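-- pv_equiv track=rewrite | github.com/herumi/mcl | src/montgomery.py | getMontgomeryCoeff
-- ===== SOURCE A (Python) =====
-- def getMontgomeryCoeff(pLow, W):
--   pp = 0
--   t = 0
--   x = 1
--   for i in range(W):
--     if t % 2 == 0:
--       t += pLow
--       pp += x
--     t >>= 1
--     x <<= 1
--   return pp
-- ===== SOURCE B (Python) =====
-- def getMontgomeryCoeff(pLow, W):
--   # Montgomery coefficient -1/pLow mod 2**W by Hensel (Newton) lifting: each
--   # round doubles the number of correct bits, instead of producing one bit per step.
--   # An inverse modulo a power of two exists only for odd numbers, so work with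
--   # the low bit set.
--   p = pLow | 1
--   inv = 1      # inverse of p modulo 2
--   bits = 1
--   while bits < W:
--     bits *= 2
--     inv = inv * (2 - p * inv) % (1 << bits)
--   return -inv % (1 << W)
-- ===== Notes on version B (the rewrite author's own statement) =====
-- stated objective: faster
-- what changed: Replaces A's W-iteration bit-at-a-time loop with Hensel (Newton) lifting of the inverse mod 2^W, doubling the number of correct bits each round (O(log W) big-int multiplications); intended as faster, measured 12x-57x across advisory runs at the largest size both finished (n=65536); Pre_ excludes negative W, where a bit-width is meaningless: A happens to return 0 there while B's mask 1 << W raises ValueError.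
-- outside the precondition, e.g. on getMontgomeryCoeff(3, -1): A returns 0, B raises ValueError
import Mathlib
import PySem

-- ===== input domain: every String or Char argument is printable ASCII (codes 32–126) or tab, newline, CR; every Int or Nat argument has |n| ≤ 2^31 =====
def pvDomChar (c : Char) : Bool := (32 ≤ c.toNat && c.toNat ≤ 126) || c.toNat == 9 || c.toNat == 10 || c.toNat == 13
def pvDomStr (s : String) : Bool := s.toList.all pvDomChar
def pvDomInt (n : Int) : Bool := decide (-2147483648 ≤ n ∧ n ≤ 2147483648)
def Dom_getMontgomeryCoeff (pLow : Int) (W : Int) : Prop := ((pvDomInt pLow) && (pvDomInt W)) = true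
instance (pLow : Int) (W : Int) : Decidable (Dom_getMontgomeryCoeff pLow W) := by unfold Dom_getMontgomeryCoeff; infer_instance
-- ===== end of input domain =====

-- B replaces A's W-step bit-at-a-time loop by Hensel (Newton) lifting of the inverse
-- mod 2^W, doubling the number of correct bits each round; intended as faster (advisory timing
-- runs measured 12x-57x at the largest size both versions finished, n=65536).

-- ===== PORT A =====
def getMontgomeryCoeff (pLow : Int) (W : Int) : Int :=
  let s := (PySem.List.pyRange 0 W 1).foldl
    (fun (s : Int × Int × Int) (_ : Int) =>
      let pt := if PySem.Int.mod s.2.1 2 = 0 then (s.1 + s.2.2, s.2.1 + pLow) else (s.1, s.2.1)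
      (pt.1, PySem.Int.floordiv pt.2 2, s.2.2 * 2))
    (0, 0, 1)
  s.1

-- ===== PORT B =====
-- Source B's while-loop: bits starts at 1 and doubles, so it is kept as a positive Nat
-- (the 0 < bits argument only justifies termination; the computation is unchanged).
def pvBLoop (p : Int) (W : Int) (inv : Int) (bits : Nat) (hb : 0 < bits) : Int :=
  if h : (bits : Int) < W then
    pvBLoop p W (PySem.Int.mod (inv * (2 - p * inv)) (2 ^ (bits * 2))) (bits * 2) (by omega)
  else inv
termination_by W.toNat - bits
decreasing_by omega

def getMontgomeryCoeff_alt (pLow : Int) (W : Int) : Int :=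
  let p := PySem.Int.bor pLow 1
  PySem.Int.mod (-(pvBLoop p W 1 1 Nat.one_pos)) (2 ^ W.toNat)

-- ===== PRECONDITION & SPEC =====
-- Pre_ excludes negative W (a negative bit-width): A happens to return 0 there while
-- B's mask 1 << W raises ValueError.
def Pre_getMontgomeryCoeff (pLow : Int) (W : Int) : Prop := 0 ≤ W
instance (pLow : Int) (W : Int) : Decidable (Pre_getMontgomeryCoeff pLow W) := by unfold Pre_getMontgomeryCoeff; infer_instance
def pvWitness_getMontgomeryCoeff : Int × Int := (5, 4)
def Spec_getMontgomeryCoeff (pLow : Int) (W : Int) (out : Int) : Prop := out = getMontgomeryCoeff_alt pLow W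
instance (pLow : Int) (W : Int) (out : Int) : Decidable (Spec_getMontgomeryCoeff pLow W out) := by unfold Spec_getMontgomeryCoeff; infer_instance

-- ===== CLAIM (what is proved, stated in full; the proofs are below) =====
def Claim_equal_getMontgomeryCoeff : Prop := ∀ (pLow : Int) (W : Int), Dom_getMontgomeryCoeff pLow W → Pre_getMontgomeryCoeff pLow W → Spec_getMontgomeryCoeff pLow W (getMontgomeryCoeff pLow W)

-- ===== LEMMAS AND PROOFS =====

-- A's loop body as a named function (proof helper only).
def aStep (pLow : Int) (s : Int × Int × Int) : Int × Int × Int :=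
  let pt := if PySem.Int.mod s.2.1 2 = 0 then (s.1 + s.2.2, s.2.1 + pLow) else (s.1, s.2.1)
  (pt.1, PySem.Int.floordiv pt.2 2, s.2.2 * 2)

-- a fold whose body ignores the list elements is an iterate
lemma foldl_const_iterate {α β : Type} (f : α → α) :
    ∀ (l : List β) (s : α), l.foldl (fun a _ => f a) s = f^[l.length] s := by
  intro l
  induction l with
  | nil => intro s; rfl
  | cons x xs ih =>
    intro s
    simp [List.foldl, ih, Function.iterate_succ_apply]

lemma pyRange_len (W : Int) : (PySem.List.pyRange 0 W 1).length = W.toNat := by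
  unfold PySem.List.pyRange
  rw [if_neg (by norm_num : (1:Int) ≠ 0)]
  simp only [List.length_map, List.length_range]
  rw [if_pos (by norm_num : (0:Int) < 1)]
  by_cases h : (0:Int) < W
  · rw [if_pos h]; omega
  · rw [if_neg h]; omega

-- explicit description of one A-step (turns the port's let/if body into plain arithmetic)
lemma aStep_eq (pLow pp t x : Int) :
    aStep pLow (pp, t, x) =
      if t % 2 = 0 then (pp + x, (t + pLow) / 2, x * 2) else (pp, t / 2, x * 2) := by
  unfold aStep
  rw [PySem.Int.mod_eq_emod_of_pos (by norm_num : (0:Int) < 2)]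
  by_cases h : t % 2 = 0 <;> simp [h]

-- A-side invariant: after n iterations, x = 2^n, 0 ≤ pp < 2^n and pp*q - 2^n * t = 2^n - 1,
-- where q is pLow with its low bit forced.
lemma aIter (pLow q : Int) (hq : q = if pLow % 2 = 0 then pLow + 1 else pLow) :
    ∀ n : Nat,
      ((aStep pLow)^[n] (0, 0, 1)).2.2 = 2 ^ n ∧
      0 ≤ ((aStep pLow)^[n] (0, 0, 1)).1 ∧
      ((aStep pLow)^[n] (0, 0, 1)).1 < 2 ^ n ∧
      ((aStep pLow)^[n] (0, 0, 1)).1 * q - 2 ^ n * ((aStep pLow)^[n] (0, 0, 1)).2.1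
        = 2 ^ n - 1 := by
  intro n
  induction n with
  | zero => simp
  | succ n ih =>
    obtain ⟨hx, hpp0, hpp1, hinv⟩ := ih
    rw [Function.iterate_succ_apply']
    set s := (aStep pLow)^[n] (0, 0, 1) with hs
    obtain ⟨pp, t, x⟩ := s
    simp only at hx hpp0 hpp1 hinv
    subst hx
    rw [aStep_eq]
    by_cases ht : t % 2 = 0
    · rw [if_pos ht]
      simp only
      refine ⟨by ring, by positivity, by
          have : (0:Int) < 2 ^ n := by positivity
          omega, ?_⟩
      have h2 : 2 * ((t + pLow) / 2) = t + pLow - (t + pLow) % 2 := by omega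
      by_cases hp : pLow % 2 = 0
      · rw [if_pos hp] at hq
        have hm : (t + pLow) % 2 = 0 := by omega
        rw [hm] at h2
        subst hq
        linear_combination hinv - (2:ℤ) ^ n * h2
      · rw [if_neg hp] at hq
        have hm : (t + pLow) % 2 = 1 := by omega
        rw [hm] at h2
        subst hq
        linear_combination hinv - (2:ℤ) ^ n * h2
    · rw [if_neg ht]
      simp only
      refine ⟨by ring, hpp0, by
          have : (0:Int) < 2 ^ n := by positivity
          omega, ?_⟩
      have hm : t % 2 = 1 := by omega
      have h2 : 2 * (t / 2) = t - 1 := by omega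
      linear_combination hinv - (2:ℤ) ^ n * h2

-- x ||| 1 sets the low bit and leaves the rest
lemma nat_lor_one (n : Nat) : (n ||| 1) = 2 * (n / 2) + 1 := by
  apply Nat.eq_of_testBit_eq
  intro i
  rw [Nat.testBit_or]
  cases i with
  | zero => simp [Nat.testBit_zero]
  | succ j =>
    rw [Nat.testBit_succ, Nat.testBit_succ, Nat.testBit_succ]
    have h : (2 * (n / 2) + 1) / 2 = n / 2 := by omega
    rw [h]
    simp

lemma bor_one_eq (x : Int) : PySem.Int.bor x 1 = if x % 2 = 0 then x + 1 else x := by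
  unfold PySem.Int.bor
  have h1 : Int.toNat 1 = 1 := rfl
  by_cases hx : 0 ≤ x
  · rw [if_pos hx, if_pos (by norm_num : (0:Int) ≤ 1), h1, nat_lor_one]
    split_ifs with h <;> (push_cast; omega)
  · rw [if_neg hx, if_pos (by norm_num : (0:Int) ≤ 1), h1, Nat.and_one_is_mod]
    split_ifs with h <;> omega

-- B-side invariant: the lifting keeps 2^bits ∣ p*inv - 1, and the loop only stops with
-- bits ≥ W, so the result r satisfies 2^W.toNat ∣ p*r - 1.
lemma pvBLoop_dvd (p W : Int) :
    ∀ (n : Nat) (bits : Nat) (hb : 0 < bits) (inv : Int),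
      W.toNat - bits = n → ((2:Int) ^ bits ∣ p * inv - 1) →
      (2:Int) ^ W.toNat ∣ p * pvBLoop p W inv bits hb - 1 := by
  intro n
  induction n using Nat.strong_induction_on with
  | _ n ih =>
    intro bits hb inv hn hdvd
    rw [pvBLoop]
    by_cases h : (bits : Int) < W
    · rw [dif_pos h]
      have hbW : bits < W.toNat := by omega
      refine ih (W.toNat - bits * 2) (by omega) (bits * 2) (by omega) _ rfl ?_
      obtain ⟨c, hc⟩ := hdvd
      have hMpos : (0:Int) < 2 ^ (bits * 2) := by positivity
      rw [PySem.Int.mod_eq_emod_of_pos hMpos, Int.emod_def]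
      refine ⟨-c ^ 2 - p * (inv * (2 - p * inv) / 2 ^ (bits * 2)), ?_⟩
      have hsq : ((2:Int) ^ bits) * ((2:Int) ^ bits) = 2 ^ (bits * 2) := by
        rw [← pow_add]; ring_nf
      calc p * (inv * (2 - p * inv) - 2 ^ (bits * 2) * (inv * (2 - p * inv) / 2 ^ (bits * 2))) - 1
          = -((p * inv - 1) * (p * inv - 1)) - 2 ^ (bits * 2) * (p * (inv * (2 - p * inv) / 2 ^ (bits * 2))) := by ring
        _ = 2 ^ (bits * 2) * (-c ^ 2 - p * (inv * (2 - p * inv) / 2 ^ (bits * 2))) := by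
            rw [hc, ← hsq]; ring
    · rw [dif_neg h]
      exact dvd_trans (pow_dvd_pow 2 (by omega)) hdvd

-- ===== VERDICT (by name: the statement is the Claim_ definition above) =====
theorem getMontgomeryCoeff_spec : Claim_equal_getMontgomeryCoeff := by
  intro pLow W _ hpre
  unfold Pre_getMontgomeryCoeff at hpre
  unfold Spec_getMontgomeryCoeff
  -- A's result as an iterate
  have hA : getMontgomeryCoeff pLow W = ((aStep pLow)^[W.toNat] (0, 0, 1)).1 := by
    unfold getMontgomeryCoeff
    change ((PySem.List.pyRange 0 W 1).foldl (fun s _ => aStep pLow s) (0, 0, 1)).1 = _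
    rw [foldl_const_iterate (aStep pLow) _ _, pyRange_len]
  set q : Int := PySem.Int.bor pLow 1 with hqdef
  have hq : q = if pLow % 2 = 0 then pLow + 1 else pLow := by rw [hqdef, bor_one_eq]
  have hodd : q % 2 = 1 := by
    rw [hq]; by_cases h : pLow % 2 = 0 <;> simp [h] <;> omega
  obtain ⟨_, hpp0, hpp1, hinv⟩ := aIter pLow q hq W.toNat
  set pp := ((aStep pLow)^[W.toNat] (0, 0, 1)).1 with hppdef
  -- B's result
  set r : Int := pvBLoop q W 1 1 Nat.one_pos with hrdef
  have hB : getMontgomeryCoeff_alt pLow W = PySem.Int.mod (-r) (2 ^ W.toNat) := by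
    unfold getMontgomeryCoeff_alt
    simp only
    rw [← hqdef, ← hrdef]
  have hdvd : (2:Int) ^ W.toNat ∣ q * r - 1 := by
    refine pvBLoop_dvd q W (W.toNat - 1) 1 Nat.one_pos 1 rfl ?_
    refine ⟨(q - 1) / 2, by omega⟩
  set P : Int := 2 ^ W.toNat with hP
  have hPpos : (0:Int) < P := by positivity
  rw [hA, hB, PySem.Int.mod_eq_emod_of_pos hPpos]
  set v : Int := -r % P with hv
  obtain ⟨c2, hc2⟩ := hdvd
  -- P divides q*pp + 1
  obtain ⟨t, ht⟩ : P ∣ pp * q + 1 := ⟨((aStep pLow)^[W.toNat] (0, 0, 1)).2.1 + 1, by linarith [hinv]⟩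
  have hvdef : v = -r - P * (-r / P) := by rw [hv, Int.emod_def]
  have hv0 : 0 ≤ v := hv ▸ Int.emod_nonneg _ (by positivity)
  have hv1 : v < P := hv ▸ Int.emod_lt_of_pos _ hPpos
  -- pp - v = pp*(1 - q*r) + r*(pp*q + 1) + (-r - v), each divisible by P
  have hdiff : P ∣ pp - v := by
    refine ⟨-pp * c2 + r * t + (-r / P), ?_⟩
    have e1 : pp - v = pp * (1 - (q * r)) + r * (pp * q + 1) + (-r - v) := by ring
    rw [e1]
    have e2 : (1 : Int) - q * r = -(P * c2) := by omega
    have e3 : -r - v = P * (-r / P) := by omega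
    rw [e2, ht, e3]
    ring
  have : pp - v = 0 := Int.eq_zero_of_abs_lt_dvd hdiff (by rw [abs_lt]; omega)
  omega
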